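-- pv_equiv track=rewrite | github.com/zhuakexi/hic_basic | plot/utils.py | filling_l2r_mpl
-- ===== SOURCE A (Python) =====
-- def filling_l2r_mpl(rows, cols, features):
--     """
--     Helper to iterate within row-cols.
--     Mpl_flavor, starts with 0.
--     """
--     for i in range(rows):
--         for j in range(cols):
--             k = i * cols + j
--             try:
--                 feature = features[k]
--             except IndexError:
--                 feature = None
--             yield i, j, k, feature
-- ===== SOURCE B (Python) =====
-- def filling_l2r_mpl(rows, cols, features):
--     """Materialize the grid's feature column up front (slice + None padding),
--     then walk it with enumerate, recovering (i, j) from k via divmod."""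
--     if rows <= 0 or cols <= 0:
--         return
--     total = rows * cols
--     head = list(features[:total])
--     padded = head + [None] * (total - len(head))
--     for k, feature in enumerate(padded):
--         i, j = divmod(k, cols)
--         yield i, j, k, feature
-- ===== Notes on version B (the rewrite author's own statement) =====
-- stated objective: alternative
-- what changed: Instead of nested row/column loops with a per-cell try/except lookup, B first materializes the features padded with None to rows*cols by slicing, then makes one enumerate pass over that list, recovering (i,j) from the linear index via divmod.
import Mathlib
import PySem

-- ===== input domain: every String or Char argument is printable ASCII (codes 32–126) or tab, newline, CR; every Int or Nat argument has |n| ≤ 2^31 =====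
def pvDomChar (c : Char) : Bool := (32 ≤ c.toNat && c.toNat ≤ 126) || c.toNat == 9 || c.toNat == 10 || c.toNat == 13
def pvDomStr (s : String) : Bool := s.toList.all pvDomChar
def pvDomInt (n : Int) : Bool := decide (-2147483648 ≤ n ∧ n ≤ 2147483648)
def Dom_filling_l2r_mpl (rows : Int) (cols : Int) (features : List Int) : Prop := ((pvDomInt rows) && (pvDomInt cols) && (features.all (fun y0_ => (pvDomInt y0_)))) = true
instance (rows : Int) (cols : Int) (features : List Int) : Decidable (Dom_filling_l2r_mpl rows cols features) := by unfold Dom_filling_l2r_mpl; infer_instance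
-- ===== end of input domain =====

-- B first materializes the feature column (slice + None padding to rows*cols), then walks it once with enumerate, recovering (i,j) by divmod; same yields in the same order.
-- ===== PORT A =====
-- generator ported as the list of its yields; nested for-i/for-j loops as nested foldl's appending each yield
def filling_l2r_mpl (rows : Int) (cols : Int) (features : List Int) : List (Int × Int × Int × Option Int) :=
  (PySem.List.pyRange 0 rows 1).foldl (fun acc i =>
    (PySem.List.pyRange 0 cols 1).foldl (fun acc2 j =>
      let k := i * cols + j
      let feature := PySem.List.pyGet? features k   -- try features[k] except IndexError: None
      acc2 ++ [(i, j, k, feature)]) acc) []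

-- ===== PORT B =====
def filling_l2r_mpl_alt (rows : Int) (cols : Int) (features : List Int) : List (Int × Int × Int × Option Int) :=
  if rows ≤ 0 ∨ cols ≤ 0 then []
  else
    let total := rows * cols
    let head := PySem.List.slice features none (some total)     -- features[:total]
    let padded := head.map some ++ List.replicate (total - (head.length : Int)).toNat (none : Option Int)
    (PySem.List.enumerate padded 0).map (fun p =>
      (PySem.Int.floordiv p.1 cols, PySem.Int.mod p.1 cols, p.1, p.2))

-- ===== PRECONDITION & SPEC =====
def Spec_filling_l2r_mpl (rows : Int) (cols : Int) (features : List Int) (out : List (Int × Int × Int × Option Int)) : Prop := out = filling_l2r_mpl_alt rows cols features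
instance (rows : Int) (cols : Int) (features : List Int) (out : List (Int × Int × Int × Option Int)) : Decidable (Spec_filling_l2r_mpl rows cols features out) := by unfold Spec_filling_l2r_mpl; infer_instance

-- ===== CLAIM (what is proved, stated in full; the proofs are below) =====
def Claim_equal_filling_l2r_mpl : Prop := ∀ (rows : Int) (cols : Int) (features : List Int), Dom_filling_l2r_mpl rows cols features → Spec_filling_l2r_mpl rows cols features (filling_l2r_mpl rows cols features)

-- ===== LEMMAS AND PROOFS =====

-- one row of the grid, re-indexed: the j-loop of row number n equals the slice [n*cols, (n+1)*cols) of the flat walk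
lemma row_block {α : Type} (cols : Int) (hc : 0 < cols) (n : Int)
    (g : Int → Int → Int → α) :
    (PySem.List.pyRange 0 cols 1).map (fun j => g n j (n * cols + j))
      = (PySem.List.pyRange (n * cols) ((n + 1) * cols) 1).map
          (fun k => g (PySem.Int.floordiv k cols) (PySem.Int.mod k cols) k) := by
  rw [PySem.List.pyRange_one 0 cols, PySem.List.pyRange_one (n * cols) ((n + 1) * cols)]
  have h1 : ((n + 1) * cols - n * cols) = cols := by ring
  rw [h1]
  simp only [Int.sub_zero, List.map_map]
  apply List.map_congr_left
  intro a ha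
  simp only [List.mem_range] at ha
  have hac : (a : Int) < cols := by omega
  have hdiv : PySem.Int.floordiv (n * cols + (a : Int)) cols = n := by
    rw [PySem.Int.floordiv_eq_iff_of_pos hc]
    constructor <;> nlinarith [Int.natCast_nonneg a]
  have hmod : PySem.Int.mod (n * cols + (a : Int)) cols = (a : Int) := by
    have := PySem.Int.floordiv_mul_add_mod (n * cols + (a : Int)) cols
    rw [hdiv] at this
    omega
  simp [Function.comp, hdiv, hmod]

-- the nested loop over rows 0..n equals the flat loop over 0..n*cols
lemma grid_flat {α : Type} (cols : Int) (hc : 0 < cols)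
    (g : Int → Int → Int → α) : ∀ n : Nat,
    (PySem.List.pyRange 0 (n : Int) 1).flatMap
        (fun i => (PySem.List.pyRange 0 cols 1).map (fun j => g i j (i * cols + j)))
      = (PySem.List.pyRange 0 ((n : Int) * cols) 1).map
          (fun k => g (PySem.Int.floordiv k cols) (PySem.Int.mod k cols) k) := by
  intro n
  induction n with
  | zero => simp [PySem.List.pyRange_one_eq_nil]
  | succ m ih =>
      have hsplit : PySem.List.pyRange 0 (((m : Int) + 1) * cols) 1
          = PySem.List.pyRange 0 ((m : Int) * cols) 1
            ++ PySem.List.pyRange ((m : Int) * cols) (((m : Int) + 1) * cols) 1 := by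
        exact PySem.List.pyRange_one_append 0 ((m : Int) * cols) (((m : Int) + 1) * cols)
          (by positivity) (by nlinarith)
      have hrange : PySem.List.pyRange 0 ((m : Int) + 1) 1
          = PySem.List.pyRange 0 (m : Int) 1 ++ [(m : Int)] := by
        simpa using PySem.List.pyRange_one_succ_right (a := 0) (b := (m : Int)) (by positivity)
      push_cast
      rw [hrange, List.flatMap_append, ih, hsplit, List.map_append]
      simp [row_block cols hc (m : Int) g]

-- the padded feature column, read at position k, is exactly A's try/except lookup
lemma padded_get (features : List Int) (total : Int) (ht : 0 ≤ total) (k : Int)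
    (hk0 : 0 ≤ k) (hk : k < total) :
    PySem.List.pyGetD
      ((PySem.List.slice features none (some total)).map some
        ++ List.replicate (total - ((PySem.List.slice features none (some total)).length : Int)).toNat (none : Option Int))
      k (none : Option Int)
      = PySem.List.pyGet? features k := by
  rw [PySem.List.slice_to features ht, PySem.List.pyGet?_of_nonneg features hk0,
      PySem.List.pyGetD_of_nonneg _ _ hk0, List.getD_eq_getElem?_getD]
  have hlen : (features.take total.toNat).length = min total.toNat features.length := by simp
  by_cases hf : k.toNat < features.length
  · have hkt : k.toNat < ((features.take total.toNat).map some).length := by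
      simp [List.length_take]; omega
    rw [List.getElem?_append_left hkt, List.getElem?_map,
        List.getElem?_take_of_lt (by omega), List.getElem?_eq_getElem hf]
    rfl
  · -- k beyond the features: padding gives none, features[k]? gives none
    have h1 : ((features.take total.toNat).map some).length ≤ k.toNat := by
      simp [List.length_take]; omega
    rw [List.getElem?_append_right h1, List.getElem?_eq_getElem (by
      simp [List.length_take]; omega)]
    simp [List.getElem?_eq_none (by omega : features.length ≤ k.toNat)]

-- ===== VERDICT (by name: the statement is the Claim_ definition above) =====
theorem filling_l2r_mpl_spec : Claim_equal_filling_l2r_mpl := by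
  unfold Claim_equal_filling_l2r_mpl
  intro rows cols features _
  unfold Spec_filling_l2r_mpl filling_l2r_mpl filling_l2r_mpl_alt
  by_cases hdeg : rows ≤ 0 ∨ cols ≤ 0
  · rw [if_pos hdeg]
    rcases hdeg with h | h
    · rw [PySem.List.pyRange_one_eq_nil h]; rfl
    · simp [PySem.List.pyRange_one_eq_nil h]
  · rw [if_neg hdeg]
    push Not at hdeg
    obtain ⟨hr, hc⟩ := hdeg
    -- A side: nested loops = flat map over 0..rows*cols
    simp only [PySem.List.foldl_append_singleton_eq_map]
    rw [PySem.List.foldl_append_eq_flatMap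
        (g := fun i => (PySem.List.pyRange 0 cols 1).map
          (fun j => (i, j, i * cols + j, PySem.List.pyGet? features (i * cols + j))))]
    simp only [List.nil_append]
    have hflat : (PySem.List.pyRange 0 rows 1).flatMap
        (fun i => (PySem.List.pyRange 0 cols 1).map
          (fun j => (i, j, i * cols + j, PySem.List.pyGet? features (i * cols + j))))
        = (PySem.List.pyRange 0 (rows * cols) 1).map
            (fun k => (PySem.Int.floordiv k cols, PySem.Int.mod k cols, k, PySem.List.pyGet? features k)) := by
      obtain ⟨n, rfl⟩ : ∃ n : Nat, rows = (n : Int) := ⟨rows.toNat, (Int.toNat_of_nonneg (le_of_lt hr)).symm⟩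
      exact grid_flat cols hc (fun i j k => (i, j, k, PySem.List.pyGet? features k)) n
    rw [hflat]
    -- B side: enumerate over the padded column = the same flat map
    have ht : (0:Int) ≤ rows * cols := by positivity
    set padded := (PySem.List.slice features none (some (rows * cols))).map some
        ++ List.replicate ((rows * cols) - ((PySem.List.slice features none (some (rows * cols))).length : Int)).toNat (none : Option Int) with hpdef
    have hplen : (padded.length : Int) = rows * cols := by
      rw [hpdef]
      rw [PySem.List.slice_to features ht]
      simp
      omega
    rw [PySem.List.enumerate_eq_map_pyRange (d := (none : Option Int)), List.map_map]
    rw [show PySem.List.len padded = (padded.length : Int) from by simp [PySem.List.len_eq], hplen]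
    apply List.map_congr_left
    intro k hk
    rw [PySem.List.mem_pyRange_one] at hk
    simp only [Function.comp]
    rw [hpdef, padded_get features (rows * cols) ht k hk.1 hk.2]
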